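-- pv_equiv track=rewrite | github.com/Mougli1/IX.2408 | Comparison/search_cluster.py | SearchCluster
-- ===== SOURCE A (Python) =====
-- def SearchCluster(i, NN, clust):
--     if clust[i] == 0: #si le point x_i n'a pas été assigné à un cluster
--         if clust[NN[i]] > 0: #si le voisin de densité supérieur à x_i à un cluster assigné
--             clust[i] = clust[NN[i]] #alors x_i rejoint le cluster de son voisiin
--         else: #si même le voisin n'a pas de cluster
--             if i != NN[i]: # si le voisin le plus proche de x_i est  pas lui même
--                 clust = SearchCluster(int(NN[i]), NN, clust) #alors on recherche un cluster récursivement pour le voisin (on remonte donc jusqu'à trouver un point qui est dans un cluster)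
--                 clust[i] = clust[NN[i]] #on affecte x_i au cluster du voisin
--     return clust
-- ===== SOURCE B (Python) =====
-- def SearchCluster(i, NN, clust):
--     # Iterative chain + bulk assignment instead of A's recursion; mutates clust like A.
--     if clust[i] != 0:
--         return clust
--     cur = i
--     path = [i]
--     while clust[NN[cur]] == 0 and cur != NN[cur]:
--         cur = int(NN[cur])
--         path.append(cur)
--     v = clust[NN[cur]] if cur != NN[cur] else 0
--     for node in path:
--         clust[node] = v
--     return clust
-- ===== Notes on version B (the rewrite author's own statement) =====
-- stated objective: alternative
-- what changed: B replaces A's recursion (descend the NN chain, then assign on unwind) by one iterative pass that collects the chain into a list and then bulk-assigns the terminal cluster value to every collected node.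
import Mathlib
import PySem

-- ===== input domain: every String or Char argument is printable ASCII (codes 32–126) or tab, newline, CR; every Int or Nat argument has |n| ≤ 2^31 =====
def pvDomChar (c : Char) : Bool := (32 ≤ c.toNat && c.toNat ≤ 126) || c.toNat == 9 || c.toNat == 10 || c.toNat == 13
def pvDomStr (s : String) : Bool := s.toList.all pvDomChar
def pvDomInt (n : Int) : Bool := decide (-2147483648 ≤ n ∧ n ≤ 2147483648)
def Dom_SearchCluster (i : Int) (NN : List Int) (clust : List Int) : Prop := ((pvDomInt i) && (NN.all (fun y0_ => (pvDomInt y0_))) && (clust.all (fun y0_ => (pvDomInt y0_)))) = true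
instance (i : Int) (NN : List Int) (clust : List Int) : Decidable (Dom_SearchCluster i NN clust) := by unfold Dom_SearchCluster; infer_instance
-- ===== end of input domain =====

-- B follows the NN chain iteratively, collecting the visited nodes, and then bulk-assigns
-- the terminal cluster value, instead of A's recursion that assigns while unwinding
-- (same in-place mutation of clust; the theorems below are about the returned list).

-- ===== PORT A =====
-- A's recursion, with a fuel counter as a totality device; on every input admitted by
-- Pre_SearchCluster the fuel (2*len+2) exceeds the recursion depth, so it never runs out.
def SearchClusterRec : Nat → Int → List Int → List Int → List Int
  | 0, _, _, clust => clust
  | fuel+1, i, NN, clust =>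
    if PySem.List.pyGetD clust i 0 = 0 then
      if PySem.List.pyGetD clust (PySem.List.pyGetD NN i 0) 0 > 0 then
        PySem.List.pySetD clust i (PySem.List.pyGetD clust (PySem.List.pyGetD NN i 0) 0)
      else
        if i ≠ PySem.List.pyGetD NN i 0 then
          let clust' := SearchClusterRec fuel (PySem.List.pyGetD NN i 0) NN clust
          PySem.List.pySetD clust' i (PySem.List.pyGetD clust' (PySem.List.pyGetD NN i 0) 0)
        else clust
    else clust

def SearchCluster (i : Int) (NN : List Int) (clust : List Int) : List Int :=
  SearchClusterRec (2 * clust.length + 2) i NN clust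

-- ===== PORT B =====
-- The while loop of Source B (fuel as totality device, ample under Pre_SearchCluster).
def pvChainLoop : Nat → Int → List Int → List Int → List Int → (List Int × Int)
  | 0, cur, _, _, path => (path, cur)
  | fuel+1, cur, NN, clust, path =>
    let nxt := PySem.List.pyGetD NN cur 0
    if PySem.List.pyGetD clust nxt 0 = 0 ∧ cur ≠ nxt then
      pvChainLoop fuel nxt NN clust (path ++ [nxt])
    else (path, cur)

def SearchCluster_alt (i : Int) (NN : List Int) (clust : List Int) : List Int :=
  if PySem.List.pyGetD clust i 0 ≠ 0 then clust
  else
    let pc := pvChainLoop (2 * clust.length + 1) i NN clust [i]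
    let nxt := PySem.List.pyGetD NN pc.2 0
    let v := if pc.2 ≠ nxt then PySem.List.pyGetD clust nxt 0 else 0
    pc.1.foldl (fun c node => PySem.List.pySetD c node v) clust

-- ===== PRECONDITION & SPEC =====
-- A node at which A's chain stops normally: the index is valid and either it already has a
-- cluster, or its NN entry is a valid index whose cluster is assigned, or it is its own NN.
def pvHalt (NN clust : List Int) (s : Int) : Prop :=
  PySem.Raise.InRange clust.length s ∧
  (PySem.List.pyGetD clust s 0 ≠ 0 ∨
    (PySem.Raise.InRange NN.length s ∧
     PySem.Raise.InRange clust.length (PySem.List.pyGetD NN s 0) ∧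
     (PySem.List.pyGetD clust (PySem.List.pyGetD NN s 0) 0 ≠ 0 ∨ s = PySem.List.pyGetD NN s 0)))

-- One step of the NN chain (stays put on halting or index-error nodes).
def pvF (NN clust : List Int) (cur : Int) : Int :=
  if PySem.Raise.InRange clust.length cur ∧ PySem.List.pyGetD clust cur 0 = 0 ∧
     PySem.Raise.InRange NN.length cur ∧
     PySem.Raise.InRange clust.length (PySem.List.pyGetD NN cur 0)
  then PySem.List.pyGetD NN cur 0 else cur

-- Pre_ states exactly that the NN chain from i reaches a halting node within len(clust)
-- steps — the exact condition under which Python A returns normally. Outside it A raises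
-- (IndexError on an invalid index along the chain, RecursionError on an unassigned cycle
-- or an over-deep chain) and nothing is claimed.
def Pre_SearchCluster (i : Int) (NN : List Int) (clust : List Int) : Prop :=
  PySem.Raise.InRange clust.length i ∧
  (PySem.List.pyGetD clust i 0 ≠ 0 ∨
    pvHalt NN clust ((pvF NN clust)^[clust.length] i))
instance (i : Int) (NN : List Int) (clust : List Int) : Decidable (Pre_SearchCluster i NN clust) := by
  unfold Pre_SearchCluster pvHalt; infer_instance

def pvWitness_SearchCluster : Int × List Int × List Int := (2, [0, 0, 1], [5, 0, 0])

def Spec_SearchCluster (i : Int) (NN : List Int) (clust : List Int) (out : List Int) : Prop := out = SearchCluster_alt i NN clust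
instance (i : Int) (NN : List Int) (clust : List Int) (out : List Int) : Decidable (Spec_SearchCluster i NN clust out) := by unfold Spec_SearchCluster; infer_instance

-- ===== CLAIM (what is proved, stated in full; the proofs are below) =====
def Claim_equal_SearchCluster : Prop := ∀ (i : Int) (NN : List Int) (clust : List Int), Dom_SearchCluster i NN clust → Pre_SearchCluster i NN clust → Spec_SearchCluster i NN clust (SearchCluster i NN clust)

-- ===== LEMMAS AND PROOFS =====

-- Python's normalised index (valid for -n ≤ x < n).
def pvNrm (n : Nat) (x : Int) : Nat := if 0 ≤ x then x.toNat else n - (-x).toNat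

lemma pvNrm_lt {n : Nat} {x : Int} (h : PySem.Raise.InRange n x) : pvNrm n x < n := by
  obtain ⟨h1, h2⟩ := h
  unfold pvNrm
  split <;> omega

lemma pv_get (xs : List Int) (x d : Int) (h : PySem.Raise.InRange xs.length x) :
    PySem.List.pyGetD xs x d = xs.getD (pvNrm xs.length x) d := by
  obtain ⟨h1, h2⟩ := h
  by_cases hx : 0 ≤ x
  · simp [PySem.List.pyGetD, PySem.List.pyGet?, PySem.List.pyIdx?, pvNrm, hx, h2, List.getD]
  · simp [PySem.List.pyGetD, PySem.List.pyGet?, PySem.List.pyIdx?, pvNrm, hx, h1, List.getD]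

lemma pv_set (xs : List Int) (x v : Int) (h : PySem.Raise.InRange xs.length x) :
    PySem.List.pySetD xs x v = xs.set (pvNrm xs.length x) v := by
  obtain ⟨h1, h2⟩ := h
  by_cases hx : 0 ≤ x
  · simp [PySem.List.pySetD, PySem.List.pySet?, PySem.List.pyIdx?, pvNrm, hx, h2]
  · simp [PySem.List.pySetD, PySem.List.pySet?, PySem.List.pyIdx?, pvNrm, hx, h1]

lemma pv_get_set (c : List Int) (a y v d : Int)
    (ha : PySem.Raise.InRange c.length a) (hy : PySem.Raise.InRange c.length y) :
    PySem.List.pyGetD (PySem.List.pySetD c a v) y d =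
      if pvNrm c.length a = pvNrm c.length y then v else PySem.List.pyGetD c y d := by
  have hlen : (PySem.List.pySetD c a v).length = c.length := PySem.List.length_pySetD c a v
  rw [pv_get _ y d (by rw [hlen]; exact hy), pv_set c a v ha]
  have hka : pvNrm c.length a < c.length := pvNrm_lt ha
  have hky : pvNrm c.length y < c.length := pvNrm_lt hy
  have hset : (c.set (pvNrm c.length a) v).length = c.length := by simp
  rw [show (c.set (pvNrm c.length a) v).length = c.length from hset]
  rw [List.getD_eq_getElem _ d (by rw [hset]; exact hky)]
  rw [List.getElem_set]
  rw [pv_get c y d hy, List.getD_eq_getElem _ d hky]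

lemma pv_set_zero (c : List Int) (x : Int) (h : PySem.Raise.InRange c.length x)
    (h0 : PySem.List.pyGetD c x 0 = 0) : PySem.List.pySetD c x 0 = c := by
  rw [pv_set c x 0 h]
  have hk : pvNrm c.length x < c.length := pvNrm_lt h
  rw [pv_get c x 0 h, List.getD_eq_getElem _ 0 hk] at h0
  rw [← h0]
  exact List.set_getElem_self hk

lemma pv_set_swap (c : List Int) (a b v : Int)
    (ha : PySem.Raise.InRange c.length a) (hb : PySem.Raise.InRange c.length b) :
    PySem.List.pySetD (PySem.List.pySetD c a v) b v =
    PySem.List.pySetD (PySem.List.pySetD c b v) a v := by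
  have hla := PySem.List.length_pySetD c a v
  have hlb := PySem.List.length_pySetD c b v
  rw [pv_set c a v ha, pv_set c b v hb,
      pv_set _ b v (by simp [PySem.Raise.InRange] at hb ⊢; omega),
      pv_set _ a v (by simp [PySem.Raise.InRange] at ha ⊢; omega)]
  simp only [List.length_set]
  by_cases h : pvNrm c.length a = pvNrm c.length b
  · rw [h]
  · exact List.set_comm v v h

-- The bulk assignment of Source B's final for-loop.
def pvWAll (v : Int) (c : List Int) (p : List Int) : List Int :=
  p.foldl (fun c node => PySem.List.pySetD c node v) c

lemma pvWAll_keep (v d : Int) : ∀ (p c : List Int) (y : Int),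
    (∀ x ∈ p, PySem.Raise.InRange c.length x) → PySem.Raise.InRange c.length y →
    PySem.List.pyGetD c y d = v → PySem.List.pyGetD (pvWAll v c p) y d = v := by
  intro p
  induction p with
  | nil => intro c y _ _ h; exact h
  | cons a p ih =>
      intro c y hr hy hv
      show PySem.List.pyGetD (pvWAll v (PySem.List.pySetD c a v) p) y d = v
      have ha : PySem.Raise.InRange c.length a := hr a (by simp)
      have hlen := PySem.List.length_pySetD c a v
      refine ih (PySem.List.pySetD c a v) y (fun x hx => by rw [hlen]; exact hr x (by simp [hx]))
        (by rw [hlen]; exact hy) ?_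
      rw [pv_get_set c a y v d ha hy]
      split
      · rfl
      · exact hv

lemma pvWAll_mem (v d : Int) : ∀ (p c : List Int) (y : Int),
    (∀ x ∈ p, PySem.Raise.InRange c.length x) → y ∈ p →
    PySem.List.pyGetD (pvWAll v c p) y d = v := by
  intro p
  induction p with
  | nil => intro c y _ h; cases h
  | cons a p ih =>
      intro c y hr hy
      show PySem.List.pyGetD (pvWAll v (PySem.List.pySetD c a v) p) y d = v
      have hlen := PySem.List.length_pySetD c a v
      have ha : PySem.Raise.InRange c.length a := hr a (by simp)
      rcases List.mem_cons.mp hy with h | h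
      · rw [h]
        refine pvWAll_keep v d p (PySem.List.pySetD c a v) a
          (fun x hx => by rw [hlen]; exact hr x (by simp [hx]))
          (by rw [hlen]; exact ha) ?_
        rw [pv_get_set c a a v d ha ha, if_pos rfl]
      · exact ih (PySem.List.pySetD c a v) y
          (fun x hx => by rw [hlen]; exact hr x (by simp [hx])) h

lemma pvWAll_swap (v : Int) : ∀ (p c : List Int) (a : Int),
    PySem.Raise.InRange c.length a → (∀ x ∈ p, PySem.Raise.InRange c.length x) →
    pvWAll v (PySem.List.pySetD c a v) p = PySem.List.pySetD (pvWAll v c p) a v := by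
  intro p
  induction p with
  | nil => intro c a _ _; rfl
  | cons b p ih =>
      intro c a ha hr
      have hb : PySem.Raise.InRange c.length b := hr b (by simp)
      have hlen := PySem.List.length_pySetD c b v
      show pvWAll v (PySem.List.pySetD (PySem.List.pySetD c a v) b v) p
           = PySem.List.pySetD (pvWAll v (PySem.List.pySetD c b v) p) a v
      rw [pv_set_swap c a b v ha hb]
      exact ih (PySem.List.pySetD c b v) a (by rw [hlen]; exact ha)
        (fun x hx => by rw [hlen]; exact hr x (by simp [hx]))

-- The chain's remaining nodes and final node, accumulator-free.
def pvTail (NN clust : List Int) (fuel : Nat) (cur : Int) : List Int :=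
  (pvChainLoop fuel cur NN clust []).1
def pvFin (NN clust : List Int) (fuel : Nat) (cur : Int) : Int :=
  (pvChainLoop fuel cur NN clust []).2
def pvVal (NN clust : List Int) (fuel : Nat) (i : Int) : Int :=
  if pvFin NN clust fuel i ≠ PySem.List.pyGetD NN (pvFin NN clust fuel i) 0 then
    PySem.List.pyGetD clust (PySem.List.pyGetD NN (pvFin NN clust fuel i) 0) 0
  else 0

lemma pvChainLoop_acc (NN clust : List Int) : ∀ (fuel : Nat) (cur : Int) (path : List Int),
    pvChainLoop fuel cur NN clust path
      = (path ++ pvTail NN clust fuel cur, pvFin NN clust fuel cur) := by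
  intro fuel
  induction fuel with
  | zero => intro cur path; simp [pvChainLoop, pvTail, pvFin]
  | succ f ih =>
      intro cur path
      show (if PySem.List.pyGetD clust (PySem.List.pyGetD NN cur 0) 0 = 0
              ∧ cur ≠ PySem.List.pyGetD NN cur 0 then
              pvChainLoop f (PySem.List.pyGetD NN cur 0) NN clust
                (path ++ [PySem.List.pyGetD NN cur 0])
            else (path, cur)) = _
      by_cases h : PySem.List.pyGetD clust (PySem.List.pyGetD NN cur 0) 0 = 0
          ∧ cur ≠ PySem.List.pyGetD NN cur 0
      · rw [if_pos h]
        have h1 := ih (PySem.List.pyGetD NN cur 0) (path ++ [PySem.List.pyGetD NN cur 0])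
        have h2 : pvChainLoop (f+1) cur NN clust [] =
            pvChainLoop f (PySem.List.pyGetD NN cur 0) NN clust [PySem.List.pyGetD NN cur 0] := by
          show (if _ then _ else _) = _
          rw [if_pos h]
          simp
        have h3 := ih (PySem.List.pyGetD NN cur 0) [PySem.List.pyGetD NN cur 0]
        unfold pvTail pvFin
        rw [h1, h2, h3]
        simp
      · rw [if_neg h]
        have h2 : pvChainLoop (f+1) cur NN clust [] = ([], cur) := by
          show (if _ then _ else _) = _
          rw [if_neg h]
        unfold pvTail pvFin
        rw [h2]
        simp

lemma pvTail_cons (NN clust : List Int) (f : Nat) (cur : Int)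
    (h : PySem.List.pyGetD clust (PySem.List.pyGetD NN cur 0) 0 = 0
          ∧ cur ≠ PySem.List.pyGetD NN cur 0) :
    pvTail NN clust (f+1) cur = PySem.List.pyGetD NN cur 0 :: pvTail NN clust f (PySem.List.pyGetD NN cur 0)
    ∧ pvFin NN clust (f+1) cur = pvFin NN clust f (PySem.List.pyGetD NN cur 0) := by
  have h2 : pvChainLoop (f+1) cur NN clust [] =
      pvChainLoop f (PySem.List.pyGetD NN cur 0) NN clust [PySem.List.pyGetD NN cur 0] := by
    show (if _ then _ else _) = _
    rw [if_pos h]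
    simp
  unfold pvTail pvFin
  rw [h2, pvChainLoop_acc]
  simp [pvTail, pvFin]

lemma pvTail_nil (NN clust : List Int) (f : Nat) (cur : Int)
    (h : ¬(PySem.List.pyGetD clust (PySem.List.pyGetD NN cur 0) 0 = 0
          ∧ cur ≠ PySem.List.pyGetD NN cur 0)) :
    pvTail NN clust (f+1) cur = [] ∧ pvFin NN clust (f+1) cur = cur := by
  have h2 : pvChainLoop (f+1) cur NN clust [] = ([], cur) := by
    show (if _ then _ else _) = _
    rw [if_neg h]
  unfold pvTail pvFin
  rw [h2]
  exact ⟨rfl, rfl⟩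

-- Halting nodes are preserved by one chain step.
lemma pvHalt_step (NN clust : List Int) (s : Int) (h : pvHalt NN clust s) :
    pvHalt NN clust (pvF NN clust s) := by
  obtain ⟨hs, hrest⟩ := h
  rcases hrest with h0 | ⟨hNr, hsIn, hstop⟩
  · unfold pvF
    rw [if_neg (by intro hc; exact h0 hc.2.1)]
    exact ⟨hs, Or.inl h0⟩
  · by_cases hg : PySem.List.pyGetD clust s 0 = 0
    · rcases hstop with hnz | heq
      · unfold pvF
        rw [if_pos ⟨hs, hg, hNr, hsIn⟩]
        exact ⟨hsIn, Or.inl hnz⟩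
      · unfold pvF
        by_cases hc : PySem.Raise.InRange clust.length s ∧ PySem.List.pyGetD clust s 0 = 0 ∧
            PySem.Raise.InRange NN.length s ∧
            PySem.Raise.InRange clust.length (PySem.List.pyGetD NN s 0)
        · rw [if_pos hc, ← heq]
          exact ⟨hs, Or.inr ⟨hNr, hsIn, Or.inr heq⟩⟩
        · rw [if_neg hc]
          exact ⟨hs, Or.inr ⟨hNr, hsIn, Or.inr heq⟩⟩
    · unfold pvF
      rw [if_neg (by intro hc; exact hg hc.2.1)]
      exact ⟨hs, Or.inl hg⟩

lemma pvHalt_mono (NN clust : List Int) (x : Int) (k : Nat) :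
    ∀ (m : Nat), pvHalt NN clust ((pvF NN clust)^[k] x) →
      pvHalt NN clust ((pvF NN clust)^[k + m] x) := by
  intro m
  induction m with
  | zero => intro h; exact h
  | succ m ih =>
      intro h
      rw [show k + (m + 1) = (k + m) + 1 by omega, Function.iterate_succ_apply']
      exact pvHalt_step NN clust _ (ih h)

-- A node with no valid step and no cluster can never satisfy the Pre_ chain condition.
lemma pvStuck (NN clust : List Int) (k : Nat) (cur : Int)
    (hg : PySem.List.pyGetD clust cur 0 = 0)
    (hrng : ¬(PySem.Raise.InRange NN.length cur ∧
              PySem.Raise.InRange clust.length (PySem.List.pyGetD NN cur 0)))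
    (hH : pvHalt NN clust ((pvF NN clust)^[k] cur)) : False := by
  have hFi : pvF NN clust cur = cur := by
    unfold pvF
    rw [if_neg (by intro hc; exact hrng ⟨hc.2.2.1, hc.2.2.2⟩)]
  rw [Function.iterate_fixed hFi] at hH
  obtain ⟨_, h⟩ := hH
  rcases h with h | h
  · exact h hg
  · exact hrng ⟨h.1, h.2.1⟩

-- Every chain node is a valid index (given the Pre_ chain condition).
lemma pvTail_range (NN clust : List Int) : ∀ (fuel : Nat) (cur : Int),
    PySem.Raise.InRange clust.length cur → PySem.List.pyGetD clust cur 0 = 0 →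
    pvHalt NN clust ((pvF NN clust)^[fuel] cur) →
    ∀ x ∈ pvTail NN clust (fuel+1) cur, PySem.Raise.InRange clust.length x := by
  intro fuel
  induction fuel with
  | zero =>
      intro cur hcur hg hH x hx
      obtain ⟨_, h⟩ := hH
      have hcond : ¬(PySem.List.pyGetD clust (PySem.List.pyGetD NN cur 0) 0 = 0
            ∧ cur ≠ PySem.List.pyGetD NN cur 0) := by
        rcases h with h | ⟨_, _, h⟩
        · exact absurd hg h
        · rcases h with h | h
          · intro hc; exact h hc.1
          · intro hc; exact hc.2 h
      rw [(pvTail_nil NN clust 0 cur hcond).1] at hx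
      cases hx
  | succ f ih =>
      intro cur hcur hg hH x hx
      by_cases hrng : PySem.Raise.InRange NN.length cur ∧
          PySem.Raise.InRange clust.length (PySem.List.pyGetD NN cur 0)
      · by_cases hcont : PySem.List.pyGetD clust (PySem.List.pyGetD NN cur 0) 0 = 0
            ∧ cur ≠ PySem.List.pyGetD NN cur 0
        · have hFi : pvF NN clust cur = PySem.List.pyGetD NN cur 0 := by
            unfold pvF
            rw [if_pos ⟨hcur, hg, hrng.1, hrng.2⟩]
          have hH' : pvHalt NN clust ((pvF NN clust)^[f] (PySem.List.pyGetD NN cur 0)) := by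
            rw [Function.iterate_succ_apply, hFi] at hH
            exact hH
          rw [(pvTail_cons NN clust (f+1) cur hcont).1] at hx
          rcases List.mem_cons.mp hx with h' | h'
          · subst h'; exact hrng.2
          · exact ih (PySem.List.pyGetD NN cur 0) hrng.2 hcont.1 hH' x h'
        · rw [(pvTail_nil NN clust (f+1) cur hcont).1] at hx
          cases hx
      · exact absurd (pvStuck NN clust (f+1) cur hg hrng hH) not_false

lemma pvRec_succ (fuel : Nat) (i : Int) (NN clust : List Int) :
    SearchClusterRec (fuel+1) i NN clust =
    (if PySem.List.pyGetD clust i 0 = 0 then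
      if PySem.List.pyGetD clust (PySem.List.pyGetD NN i 0) 0 > 0 then
        PySem.List.pySetD clust i (PySem.List.pyGetD clust (PySem.List.pyGetD NN i 0) 0)
      else
        if i ≠ PySem.List.pyGetD NN i 0 then
          PySem.List.pySetD (SearchClusterRec fuel (PySem.List.pyGetD NN i 0) NN clust) i
            (PySem.List.pyGetD (SearchClusterRec fuel (PySem.List.pyGetD NN i 0) NN clust)
              (PySem.List.pyGetD NN i 0) 0)
        else clust
    else clust) := rfl

-- The halting-node case: the chain stops at i itself, any fuel suffices.
lemma pvHaltCase (NN clust : List Int) (fuel : Nat) (i : Int)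
    (hi : PySem.Raise.InRange clust.length i)
    (hgi : PySem.List.pyGetD clust i 0 = 0)
    (_hsIn : PySem.Raise.InRange clust.length (PySem.List.pyGetD NN i 0))
    (hstop : PySem.List.pyGetD clust (PySem.List.pyGetD NN i 0) 0 ≠ 0 ∨ i = PySem.List.pyGetD NN i 0) :
    SearchClusterRec (fuel+2) i NN clust
      = pvWAll (pvVal NN clust (fuel+1) i) clust (i :: pvTail NN clust (fuel+1) i) := by
  set s := PySem.List.pyGetD NN i 0 with hs
  have hcond : ¬(PySem.List.pyGetD clust s 0 = 0 ∧ i ≠ s) := by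
    rcases hstop with h | h
    · intro hc; exact h hc.1
    · intro hc; exact hc.2 h
  obtain ⟨ht, hf⟩ := pvTail_nil NN clust fuel i (by rw [← hs]; exact hcond)
  rw [pvRec_succ, if_pos hgi]
  by_cases h1 : PySem.List.pyGetD clust s 0 > 0
  · have hne : i ≠ s := by
      intro h; rw [← h] at h1; omega
    rw [if_pos h1]
    unfold pvVal
    rw [ht, hf, ← hs, if_pos hne]
    show _ = pvWAll _ clust [i]
    unfold pvWAll
    simp
  · rw [if_neg h1]
    by_cases h2 : i = s
    · rw [if_neg (by simpa using h2)]
      unfold pvVal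
      rw [ht, hf, ← hs, if_neg (by simpa using h2)]
      show clust = pvWAll 0 clust [i]
      unfold pvWAll
      simp only [List.foldl_cons, List.foldl_nil]
      rw [pv_set_zero clust i hi hgi]
    · have h3 : PySem.List.pyGetD clust s 0 ≠ 0 := by
        rcases hstop with h | h
        · exact h
        · exact absurd h h2
      have hstopRec : SearchClusterRec (fuel+1) s NN clust = clust := by
        rw [pvRec_succ, if_neg h3]
      rw [if_pos (by rw [← hs]; exact h2), ← hs, hstopRec]
      unfold pvVal
      rw [ht, hf, ← hs, if_pos h2]
      show PySem.List.pySetD clust i (PySem.List.pyGetD clust s 0) = pvWAll _ clust [i]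
      unfold pvWAll
      simp

lemma pvMain (NN clust : List Int) : ∀ (fuel : Nat) (i : Int),
    PySem.Raise.InRange clust.length i →
    PySem.List.pyGetD clust i 0 = 0 →
    pvHalt NN clust ((pvF NN clust)^[fuel] i) →
    SearchClusterRec (fuel+2) i NN clust
      = pvWAll (pvVal NN clust (fuel+1) i) clust (i :: pvTail NN clust (fuel+1) i) := by
  intro fuel
  induction fuel with
  | zero =>
      intro i hi hgi hH
      obtain ⟨_, h⟩ := hH
      rcases h with h | ⟨hNr, hsIn, hstop⟩
      · exact absurd hgi h
      · exact pvHaltCase NN clust 0 i hi hgi hsIn hstop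
  | succ f ih =>
      intro i hi hgi hH
      set s := PySem.List.pyGetD NN i 0 with hs
      by_cases hrng : PySem.Raise.InRange NN.length i ∧ PySem.Raise.InRange clust.length s
      · by_cases hcont : PySem.List.pyGetD clust s 0 = 0 ∧ i ≠ s
        · -- continue along the chain
          have hFi : pvF NN clust i = s := by
            unfold pvF
            rw [if_pos ⟨hi, hgi, hrng.1, by rw [← hs]; exact hrng.2⟩]
          have hH' : pvHalt NN clust ((pvF NN clust)^[f] s) := by
            rw [Function.iterate_succ_apply, hFi] at hH
            exact hH
          have hrec := ih s hrng.2 hcont.1 hH'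
          obtain ⟨ht, hf2⟩ := pvTail_cons NN clust (f+1) i (by rw [← hs]; exact hcont)
          rw [← hs] at ht hf2
          have h1 : ¬ PySem.List.pyGetD clust s 0 > 0 := by rw [hcont.1]; omega
          rw [pvRec_succ, if_pos hgi, if_neg (by rw [← hs]; exact h1),
              if_pos (by rw [← hs]; exact hcont.2), ← hs, hrec]
          have hv : pvVal NN clust (f+2) i = pvVal NN clust (f+1) s := by
            unfold pvVal; rw [hf2]
          set v := pvVal NN clust (f+1) s with hvdef
          have hranges : ∀ x ∈ s :: pvTail NN clust (f+1) s, PySem.Raise.InRange clust.length x := by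
            intro x hx
            rcases List.mem_cons.mp hx with h' | h'
            · subst h'; exact hrng.2
            · exact pvTail_range NN clust f s hrng.2 hcont.1 hH' x h'
          have hget : PySem.List.pyGetD (pvWAll v clust (s :: pvTail NN clust (f+1) s)) s 0 = v :=
            pvWAll_mem v 0 (s :: pvTail NN clust (f+1) s) clust s hranges (by simp)
          rw [hget, hv, ht]
          show PySem.List.pySetD (pvWAll v clust (s :: pvTail NN clust (f+1) s)) i v
            = pvWAll v (PySem.List.pySetD clust i v) (s :: pvTail NN clust (f+1) s)
          rw [pvWAll_swap v (s :: pvTail NN clust (f+1) s) clust i hi hranges]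
        · -- a halting node: clust[s] ≠ 0 or i = s
          have hstop : PySem.List.pyGetD clust s 0 ≠ 0 ∨ i = s := by
            by_cases h : PySem.List.pyGetD clust s 0 = 0
            · right
              by_contra hne
              exact hcont ⟨h, hne⟩
            · left; exact h
          exact pvHaltCase NN clust (f+1) i hi hgi (by rw [← hs]; exact hrng.2)
            (by rw [← hs]; exact hstop)
      · exact absurd (pvStuck NN clust (f+1) i hgi (by rw [hs] at hrng; exact hrng) hH) not_false

-- ===== VERDICT (by name: the statement is the Claim_ definition above) =====
theorem SearchCluster_spec : Claim_equal_SearchCluster := by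
  intro i NN clust _ hpre
  obtain ⟨hi, hrest⟩ := hpre
  unfold Spec_SearchCluster
  by_cases h0 : PySem.List.pyGetD clust i 0 = 0
  · rcases hrest with h | hH
    · exact absurd h0 h
    · have hH2 : pvHalt NN clust ((pvF NN clust)^[2 * clust.length] i) := by
        rw [two_mul]
        exact pvHalt_mono NN clust i clust.length clust.length hH
      have hmain := pvMain NN clust (2 * clust.length) i hi h0 hH2
      show SearchClusterRec (2 * clust.length + 2) i NN clust = SearchCluster_alt i NN clust
      rw [hmain]
      unfold SearchCluster_alt
      rw [if_neg (by simpa using h0)]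
      rw [pvChainLoop_acc NN clust (2 * clust.length + 1) i [i]]
      unfold pvVal pvWAll
      simp
  · show SearchClusterRec (2 * clust.length + 1 + 1) i NN clust = SearchCluster_alt i NN clust
    rw [pvRec_succ, if_neg h0]
    unfold SearchCluster_alt
    rw [if_pos h0]
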